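-- pv_equiv track=rewrite | github.com/PaddlePaddle/Paddle | python/paddle/distributed/fleet/meta_parallel/parallel_layers/pp_layers.py | uniform
-- ===== SOURCE A (Python) =====
-- import math
--
-- def uniform(num_items, num_parts):
--     result = [0 for _ in range(num_parts + 1)]
--     part_size = math.floor(num_items / num_parts)
--     extra_layers = num_items % num_parts
--     for i in range(1, num_parts):
--         offset = 1 if i > (num_parts - extra_layers) else 0
--         result[i] = int(min(result[i - 1] + part_size + offset, num_items))
--     result[num_parts] = num_items
--     return result
-- ===== SOURCE B (Python) =====
-- def uniform(num_items, num_parts):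
--     # Boundary i is a direct closed form: the first `small` parts hold part_size
--     # items, the remaining parts hold one extra.
--     part_size = num_items // num_parts
--     small = num_parts - num_items % num_parts
--     return [i * part_size + max(0, i - small) for i in range(num_parts + 1)]
-- ===== Notes on version B (the rewrite author's own statement) =====
-- stated objective: alternative
-- what changed: Replaces the in-place running-sum loop with a per-element min cap by one comprehension computing each boundary as a direct closed form (i*part_size plus the extra-layer correction), with no mutation and no dependence on the previous element; Pre_ excludes num_parts < 1, where A raises (ZeroDivisionError or IndexError).
-- intended difference: For num_items <= -2 with num_parts >= 2, A's per-step cap min(..., num_items) fires and its propagation through the running sum returns a non-monotone list such as [0, -5, -7, -5] for (-5, 3); B returns the monotone floor-division boundaries [0, -2, -4, -5], the intended even partition. — e.g. on uniform(-5, 3): A returns [0, -5, -7, -5], B returns [0, -2, -4, -5]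
import Mathlib
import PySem

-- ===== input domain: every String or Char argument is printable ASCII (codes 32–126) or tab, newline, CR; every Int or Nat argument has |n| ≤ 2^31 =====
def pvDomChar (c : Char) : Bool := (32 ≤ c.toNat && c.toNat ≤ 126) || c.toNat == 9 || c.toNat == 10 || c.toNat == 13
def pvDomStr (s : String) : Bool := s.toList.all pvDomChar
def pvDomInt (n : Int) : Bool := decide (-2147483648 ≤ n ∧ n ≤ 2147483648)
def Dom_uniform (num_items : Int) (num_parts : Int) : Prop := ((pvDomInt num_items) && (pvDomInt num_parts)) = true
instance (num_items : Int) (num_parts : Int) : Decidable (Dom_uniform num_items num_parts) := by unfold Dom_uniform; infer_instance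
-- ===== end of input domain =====

-- B computes each partition boundary by a direct closed form instead of A's in-place running sum with a per-element cap; equivalence is about the return value (A mutates only its own local list).


-- ===== PORT A =====
-- math.floor(num_items / num_parts) is ported as integer floor division, which is exact
-- for |num_items|, |num_parts| ≤ 2^31 (Dom): there the float quotient never rounds across an integer.
def uniform (num_items : Int) (num_parts : Int) : List Int :=
  let result : List Int := List.replicate (num_parts + 1).toNat 0
  let part_size := PySem.Int.floordiv num_items num_parts
  let extra_layers := PySem.Int.mod num_items num_parts
  let result := (PySem.List.pyRange 1 num_parts 1).foldl (fun result i =>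
    let offset : Int := if i > num_parts - extra_layers then 1 else 0
    result.set i.toNat (min (PySem.List.pyGetD result (i - 1) 0 + part_size + offset) num_items)) result
  result.set num_parts.toNat num_items

-- ===== PORT B =====
def uniform_alt (num_items : Int) (num_parts : Int) : List Int :=
  let part_size := PySem.Int.floordiv num_items num_parts
  let small := num_parts - PySem.Int.mod num_items num_parts
  (PySem.List.pyRange 0 (num_parts + 1) 1).map (fun i => i * part_size + max 0 (i - small))

-- ===== PRECONDITION & SPEC =====
-- Pre_ excludes exactly the inputs where A raises: num_parts = 0 (ZeroDivisionError in
-- num_items / num_parts) and num_parts < 0 (IndexError on result[num_parts] of the empty list).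
def Pre_uniform (num_items : Int) (num_parts : Int) : Prop := 1 ≤ num_parts
instance (num_items : Int) (num_parts : Int) : Decidable (Pre_uniform num_items num_parts) := by unfold Pre_uniform; infer_instance
def pvWitness_uniform : Int × Int := (10, 3)

-- For num_items ≤ -2 with num_parts ≥ 2, A's per-step cap min(..., num_items) fires and its
-- propagation through the running sum returns a non-monotone list such as [0,-5,-7,-5] for (-5,3);
-- B returns the monotone floor-division boundaries [0,-2,-4,-5], the intended even partition.
def D_uniform (num_items : Int) (num_parts : Int) : Prop := num_items ≤ -2 ∧ 2 ≤ num_parts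
instance (num_items : Int) (num_parts : Int) : Decidable (D_uniform num_items num_parts) := by unfold D_uniform; infer_instance

def Spec_uniform (num_items : Int) (num_parts : Int) (out : List Int) : Prop := ¬ D_uniform num_items num_parts → out = uniform_alt num_items num_parts
instance (num_items : Int) (num_parts : Int) (out : List Int) : Decidable (Spec_uniform num_items num_parts out) := by unfold Spec_uniform; infer_instance

def pvDiffWitness_uniform : Int × Int := (-5, 3)
def pvDiffWitnessOut_uniform : (List Int) × (List Int) := ([0, -5, -7, -5], [0, -2, -4, -5])

-- ===== CLAIM (what is proved, stated in full; the proofs are below) =====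
def Claim_unchanged_uniform : Prop := ∀ (num_items : Int) (num_parts : Int), Dom_uniform num_items num_parts → Pre_uniform num_items num_parts → Spec_uniform num_items num_parts (uniform num_items num_parts)
def Claim_changed_uniform : Prop := Dom_uniform (pvDiffWitness_uniform.1) (pvDiffWitness_uniform.2) ∧ Pre_uniform (pvDiffWitness_uniform.1) (pvDiffWitness_uniform.2) ∧ D_uniform (pvDiffWitness_uniform.1) (pvDiffWitness_uniform.2) ∧ uniform (pvDiffWitness_uniform.1) (pvDiffWitness_uniform.2) = pvDiffWitnessOut_uniform.1 ∧ uniform_alt (pvDiffWitness_uniform.1) (pvDiffWitness_uniform.2) = pvDiffWitnessOut_uniform.2 ∧ pvDiffWitnessOut_uniform.1 ≠ pvDiffWitnessOut_uniform.2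
def Claim_exact_uniform : Prop := ∀ (num_items : Int) (num_parts : Int), Dom_uniform num_items num_parts → Pre_uniform num_items num_parts → D_uniform num_items num_parts → uniform num_items num_parts ≠ uniform_alt num_items num_parts

-- ===== LEMMAS AND PROOFS =====

-- entry value of A's closed form (base = min 0 (N - ps)), and entry j of A's intermediate list
def pvG (ps cutv base i : Int) : Int := i * ps + max 0 (i - cutv) + base
def pvF (ps cutv base : Int) (j : Nat) : Int := if j = 0 then 0 else pvG ps cutv base (j : Int)

theorem pvG_le (N P ps ex i : Int) (hP : 1 ≤ P) (hNe : ps * P + ex = N)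
    (hex0 : 0 ≤ ex) (hexP : ex < P) (h1 : 1 ≤ i) (h2 : i ≤ P) :
    pvG ps (P - ex) (min 0 (N - ps)) i ≤ N := by
  unfold pvG
  rcases le_or_gt 0 (N - ps) with hb | hb
  · rw [min_eq_left (by omega : (0:Int) ≤ N - ps)] at *
    rcases le_or_gt (i - (P - ex)) 0 with hm | hm
    · rw [max_eq_left hm]
      rcases le_or_gt 0 ps with hps | hps
      · nlinarith [mul_le_mul_of_nonneg_right h2 hps]
      · nlinarith [mul_nonpos_of_nonpos_of_nonneg (by omega : ps + 1 ≤ 0) (by omega : (0:Int) ≤ P - 1),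
                   mul_le_mul_of_nonneg_right (by omega : 1 ≤ i) (by omega : (0:Int) ≤ -ps)]
    · rw [max_eq_right (by omega : (0:Int) ≤ i - (P - ex))]
      rcases le_or_gt 0 ps with hps | hps
      · nlinarith [mul_nonneg (by omega : (0:Int) ≤ P - i) (by omega : (0:Int) ≤ ps + 1)]
      · nlinarith [mul_nonpos_of_nonpos_of_nonneg (by omega : ps + 1 ≤ 0) (by omega : (0:Int) ≤ P - 1),
                   mul_le_mul_of_nonneg_right (by omega : 1 ≤ i) (by omega : (0:Int) ≤ -ps)]
  · rw [min_eq_right (by omega : N - ps ≤ (0:Int))]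
    have hps : ps ≤ -1 := by
      by_contra h
      have hps0 : 0 ≤ ps := by omega
      nlinarith [mul_nonneg hps0 (by omega : (0:Int) ≤ P - 1)]
    rcases le_or_gt (i - (P - ex)) 0 with hm | hm
    · rw [max_eq_left hm]
      nlinarith [mul_nonpos_of_nonneg_of_nonpos (by omega : (0:Int) ≤ i - 1) (by omega : ps ≤ 0)]
    · rw [max_eq_right (by omega : (0:Int) ≤ i - (P - ex))]
      nlinarith [mul_le_mul_of_nonneg_left (by omega : ps ≤ -1) (by omega : (0:Int) ≤ i - 1)]

theorem pvSet_at {xs : List Int} (ys : List Int) (n : Nat) (v : Int) (h : xs.length = n) :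
    (xs ++ ys).set n v = xs ++ ys.set 0 v := by
  subst h; rw [List.set_append_right _ _ (le_refl _)]; simp

theorem pvRead_at (f : Nat → Int) (n : Nat) (ys : List Int) (i : Int) (m : Nat)
    (h0 : 0 ≤ i) (him : i.toNat = m) (hmn : m < n) :
    PySem.List.pyGetD ((List.range n).map f ++ ys) i 0 = f m := by
  rw [PySem.List.pyGetD_eq_getElem _ _ h0 (by simp; omega)]
  rw [List.getElem_append_left (by simp; omega)]
  simp [him]

-- A's result in closed form: [0] ++ map (pvG ps cut base) [1..P-1] ++ [N], base = min 0 (N - ps)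
theorem uniform_closed (N P : Int) (hP : 1 ≤ P) :
    uniform N P = [0] ++ (PySem.List.pyRange 1 P 1).map
      (pvG (N / P) (P - N % P) (min 0 (N - N / P))) ++ [N] := by
  have hP0 : 0 < P := hP
  have hfd : PySem.Int.floordiv N P = N / P := PySem.Int.floordiv_eq_ediv_of_pos hP0
  have hmd : PySem.Int.mod N P = N % P := PySem.Int.mod_eq_emod_of_pos hP0
  simp only [uniform, hfd, hmd]
  have hNe : (N / P) * P + N % P = N := by
    have := Int.mul_ediv_add_emod N P; linarith
  have hex0 : 0 ≤ N % P := Int.emod_nonneg N (by omega)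
  have hexP : N % P < P := Int.emod_lt_of_pos N hP0
  set ps : Int := N / P with hpsdef
  set ex : Int := N % P with hexdef
  set base : Int := min 0 (N - ps) with hbasedef
  have hGle : ∀ i : Int, 1 ≤ i → i ≤ P → pvG ps (P - ex) base i ≤ N := fun i h1 h2 =>
    pvG_le N P ps ex i hP hNe hex0 hexP h1 h2
  have inv : ∀ k : Int, 1 ≤ k → k ≤ P →
      (PySem.List.pyRange 1 k 1).foldl (fun result i =>
          result.set i.toNat (min (PySem.List.pyGetD result (i - 1) 0 + ps +
            (if i > P - ex then 1 else 0)) N)) (List.replicate (P + 1).toNat 0)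
        = (List.range k.toNat).map (pvF ps (P - ex) base) ++ List.replicate (P + 1 - k).toNat 0 := by
    intro k hk
    induction k, hk using Int.le_induction with
    | base =>
      intro _
      rw [PySem.List.pyRange_one_eq_nil (le_refl 1), List.foldl_nil]
      have h1 : (P + 1).toNat = (P + 1 - 1).toNat + 1 := by omega
      rw [h1, List.replicate_succ]
      simp [pvF]
    | succ k hk ih =>
      intro hk1
      have hkP : k < P := by omega
      rw [PySem.List.pyRange_one_succ_right (by omega : (1:Int) ≤ k), List.foldl_append,
          ih (by omega), List.foldl_cons, List.foldl_nil]
      have hlen : ((List.range k.toNat).map (pvF ps (P - ex) base)).length = k.toNat := by simp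
      rw [pvRead_at (pvF ps (P - ex) base) k.toNat _ (k - 1) (k - 1).toNat
        (by omega) rfl (by omega)]
      have hval : min (pvF ps (P - ex) base (k - 1).toNat + ps + (if k > P - ex then 1 else 0)) N
          = pvF ps (P - ex) base k.toNat := by
        rcases eq_or_lt_of_le hk with h1 | h2
        · subst h1
          simp only [pvF, pvG, show ((1:Int) - 1).toNat = 0 from rfl, show (1:Int).toNat = 1 from rfl]
          norm_num
          rw [if_neg (by omega : ¬ (1:Int) > P - ex)]
          rw [hbasedef]
          omega
        · have hk2 : 2 ≤ k := by omega
          have e1 : (((k - 1).toNat : Nat) : Int) = k - 1 := by omega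
          have e2 : ((k.toNat : Nat) : Int) = k := by omega
          have hne1 : ¬ ((k - 1).toNat = 0) := by omega
          have hne2 : ¬ (k.toNat = 0) := by omega
          simp only [pvF, if_neg hne1, if_neg hne2, e1, e2]
          have hmx : max 0 (k - 1 - (P - ex)) + (if k > P - ex then (1:Int) else 0)
              = max 0 (k - (P - ex)) := by split_ifs <;> omega
          have hsum : pvG ps (P - ex) base (k - 1) + ps + (if k > P - ex then 1 else 0)
              = pvG ps (P - ex) base k := by
            simp only [pvG]
            have hprod : (k - 1) * ps + ps = k * ps := by ring
            linarith [hmx, hprod]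
          rw [hsum]
          exact min_eq_left (hGle k (by omega) (by omega))
      rw [hval]
      have hrep : (P + 1 - k).toNat = ((P + 1 - (k + 1)).toNat + 1) := by omega
      rw [hrep, List.replicate_succ, pvSet_at _ _ _ hlen, List.set_cons_zero]
      have hrange : List.range (k + 1).toNat = List.range k.toNat ++ [k.toNat] := by
        have : (k + 1).toNat = k.toNat + 1 := by omega
        rw [this, List.range_succ]
      rw [hrange, List.map_append, List.append_assoc]
      simp
  have hfin := inv P (by omega) (le_refl P)
  have hone : (P + 1 - P).toNat = 1 := by omega
  rw [hone] at hfin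
  have hmain : (PySem.List.pyRange 1 P 1).foldl (fun result i =>
          result.set i.toNat (min (PySem.List.pyGetD result (i - 1) 0 + ps +
            (if i > P - ex then 1 else 0)) N)) (List.replicate (P + 1).toNat 0)
        = (List.range P.toNat).map (pvF ps (P - ex) base) ++ [0] := by
    rw [hfin]; rfl
  rw [hmain]
  have hlenP : ((List.range P.toNat).map (pvF ps (P - ex) base)).length = P.toNat := by simp
  rw [pvSet_at _ _ _ hlenP, List.set_cons_zero]
  rw [PySem.List.pyRange_one]
  have hPsucc : P.toNat = (P - 1).toNat + 1 := by omega
  rw [hPsucc, List.range_succ_eq_map, List.map_cons, List.map_map, List.map_map]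
  have hhead : pvF ps (P - ex) base 0 = 0 := rfl
  rw [hhead]
  have htail : ∀ j : Nat, (pvF ps (P - ex) base ∘ Nat.succ) j
      = (pvG ps (P - ex) base ∘ fun k : Nat => 1 + (k : Int)) j := by
    intro j
    simp only [Function.comp, pvF, Nat.succ_ne_zero, if_false]
    have : ((j + 1 : Nat) : Int) = 1 + (j : Int) := by omega
    rw [this]
  rw [List.map_congr_left (fun j _ => htail j)]
  simp

-- B's result in the same shape: [0] ++ map g [1..P-1] ++ [N], g i = i*ps + max 0 (i - cut)
theorem alt_closed (N P : Int) (hP : 1 ≤ P) :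
    uniform_alt N P = [0] ++ (PySem.List.pyRange 1 P 1).map
      (fun i => i * (N / P) + max 0 (i - (P - N % P))) ++ [N] := by
  have hP0 : 0 < P := hP
  have hfd : PySem.Int.floordiv N P = N / P := PySem.Int.floordiv_eq_ediv_of_pos hP0
  have hmd : PySem.Int.mod N P = N % P := PySem.Int.mod_eq_emod_of_pos hP0
  simp only [uniform_alt, hfd, hmd]
  rw [PySem.List.pyRange_one_append 0 1 (P + 1) (by omega) (by omega),
      PySem.List.pyRange_one_cons (by omega : (0:Int) < 1)]
  simp only [zero_add]
  rw [PySem.List.pyRange_one_eq_nil (le_refl (1:Int)),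
      PySem.List.pyRange_one_succ_right (by omega : (1:Int) ≤ P)]
  rw [List.map_append, List.map_append]
  have h0 : (0:Int) * (N / P) + max 0 (0 - (P - N % P)) = 0 := by
    have hex0 : 0 ≤ N % P := Int.emod_nonneg N (by omega)
    have hexP : N % P < P := Int.emod_lt_of_pos N hP0
    simp only [Int.zero_mul, Int.zero_add]
    omega
  have hNe : (N / P) * P + N % P = N := by
    have := Int.mul_ediv_add_emod N P; linarith
  have hex0 : 0 ≤ N % P := Int.emod_nonneg N (by omega)
  have hexP : N % P < P := Int.emod_lt_of_pos N hP0
  have hlast : P * (N / P) + max 0 (N % P) = N := by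
    rw [max_eq_right hex0]; linarith [hNe, mul_comm P (N / P)]
  simp
  exact ⟨by omega, hlast⟩

-- outside D_ (with Pre_) the base term vanishes
theorem base_zero (N P : Int) (hP : 1 ≤ P) (hD : ¬ D_uniform N P) :
    min 0 (N - N / P) = 0 := by
  have hNe : (N / P) * P + N % P = N := by
    have := Int.mul_ediv_add_emod N P; linarith
  have hex0 : 0 ≤ N % P := Int.emod_nonneg N (by omega)
  have hexP : N % P < P := Int.emod_lt_of_pos N hP
  unfold D_uniform at hD
  push_neg at hD
  set ps := N / P with hps
  rcases le_or_gt P 1 with h1 | h2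
  · -- P = 1: ps = N
    have : P = 1 := by omega
    subst this
    have : ps = N := by omega
    omega
  · have hN : -1 ≤ N := by omega
    rcases le_or_gt 0 N with hN0 | hNneg
    · -- N ≥ 0: 0 ≤ ps ≤ N
      have hps0 : 0 ≤ ps := by nlinarith
      have : ps ≤ ps * P := by nlinarith
      omega
    · -- N = -1: ps = -1
      have hN1 : N = -1 := by omega
      have hpsneg : ps ≤ -1 := by nlinarith
      have : -2 < ps := by nlinarith
      omega

-- inside D_ (with Pre_) the quotient strictly exceeds N
theorem ps_gt (N P : Int) (hN : N ≤ -2) (hP : 2 ≤ P) : N < N / P := by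
  have hNe : (N / P) * P + N % P = N := by
    have := Int.mul_ediv_add_emod N P; linarith
  have hex0 : 0 ≤ N % P := Int.emod_nonneg N (by omega)
  have hexP : N % P < P := Int.emod_lt_of_pos N (by omega)
  by_contra h
  push_neg at h
  have hle : N / P ≤ N := h
  have h1 : (N / P) * P ≤ N * P :=
    mul_le_mul_of_nonneg_right hle (by omega : (0:Int) ≤ P)
  have h4 : N * P ≤ N - P := by
    nlinarith [mul_pos (by omega : (0:Int) < -N - 1) (by omega : (0:Int) < P - 1)]
  omega

-- ===== VERDICT (by name: the statement is the Claim_ definition above) =====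
theorem uniform_spec : Claim_unchanged_uniform := by
  intro N P _ hP
  unfold Spec_uniform
  intro hD
  rw [uniform_closed N P hP, alt_closed N P hP, base_zero N P hP hD]
  simp [pvG]

theorem uniform_changed : Claim_changed_uniform := by
  unfold Claim_changed_uniform; decide

theorem uniform_tight : Claim_exact_uniform := by
  intro N P _ hP hD h
  obtain ⟨hN, hP2⟩ := hD
  rw [uniform_closed N P hP, alt_closed N P hP] at h
  rw [PySem.List.pyRange_one_cons (by omega : (1:Int) < P)] at h
  simp only [List.map_cons, List.cons_append, List.nil_append,
    List.cons.injEq, true_and] at h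
  have h1 := h.1
  have hgt := ps_gt N P hN hP2
  have hex0 : 0 ≤ N % P := Int.emod_nonneg N (by omega)
  have hexP : N % P < P := Int.emod_lt_of_pos N (by omega)
  have hmin : min 0 (N - N / P) = N - N / P :=
    min_eq_right (by linarith [ps_gt N P hN hP2])
  have hmax : max (0:Int) (1 - (P - N % P)) = 0 :=
    max_eq_left (by linarith [hex0, hexP])
  rw [pvG, hmin, hmax] at h1
  linarith [h1, ps_gt N P hN hP2]
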